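-- pv_equiv track=rewrite | github.com/MeetWithAnkita/Basic_Python | Assignment04/12.py | special_two_digit_numbers
-- ===== SOURCE A (Python) =====
-- def special_two_digit_numbers(limit):
--     special_numbers = []
--     for num in range(10, min(100, limit)):
--         tens = num // 10
--         units = num % 10
--         digit_sum = tens + units
--         digit_product = tens * units
--         if digit_sum + digit_product == num:
--             special_numbers.append(num)
--     return special_numbers
-- ===== SOURCE B (Python) =====
-- def special_two_digit_numbers(limit):
--     # digit_sum + digit_product == num  <=>  t+u+t*u == 10t+u  <=>  t*(u-9)==0
--     # <=> u == 9 (since t >= 1), so the answer is every number ending in 9.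
--     return list(range(19, min(100, limit), 10))
-- ===== Notes on version B (the rewrite author's own statement) =====
-- stated objective: simpler
-- what changed: Replaced the per-number digit decomposition and equality test with the analytic characterization that the equation holds iff the units digit is 9, returning a direct step-10 range.
import Mathlib
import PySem

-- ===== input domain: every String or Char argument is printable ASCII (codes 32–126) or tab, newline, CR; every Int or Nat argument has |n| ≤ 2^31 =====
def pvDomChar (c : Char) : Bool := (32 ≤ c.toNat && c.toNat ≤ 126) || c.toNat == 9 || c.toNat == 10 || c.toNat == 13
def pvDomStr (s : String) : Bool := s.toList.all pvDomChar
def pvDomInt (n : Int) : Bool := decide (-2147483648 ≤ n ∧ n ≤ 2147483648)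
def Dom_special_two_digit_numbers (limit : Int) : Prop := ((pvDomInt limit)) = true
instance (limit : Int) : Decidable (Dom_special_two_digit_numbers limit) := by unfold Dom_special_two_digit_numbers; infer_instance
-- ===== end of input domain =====

-- B replaces A's scan-and-test loop by the analytic fact that the test holds iff the
-- units digit is 9, returning the step-10 range directly (objective: simpler).

-- ===== PORT A =====
def special_two_digit_numbers (limit : Int) : List Int :=
  (PySem.List.pyRange 10 (min 100 limit) 1).foldl
    (fun special_numbers num =>
      let tens := PySem.Int.floordiv num 10
      let units := PySem.Int.mod num 10
      let digit_sum := tens + units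
      let digit_product := tens * units
      if digit_sum + digit_product == num then special_numbers ++ [num]
      else special_numbers)
    []

-- ===== PORT B =====
def special_two_digit_numbers_alt (limit : Int) : List Int :=
  PySem.List.pyRange 19 (min 100 limit) 10

-- ===== PRECONDITION & SPEC =====
def Spec_special_two_digit_numbers (limit : Int) (out : List Int) : Prop := out = special_two_digit_numbers_alt limit
instance (limit : Int) (out : List Int) : Decidable (Spec_special_two_digit_numbers limit out) := by unfold Spec_special_two_digit_numbers; infer_instance

-- ===== CLAIM (what is proved, stated in full; the proofs are below) =====
def Claim_equal_special_two_digit_numbers : Prop := ∀ (limit : Int), Dom_special_two_digit_numbers limit → Spec_special_two_digit_numbers limit (special_two_digit_numbers limit)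

-- ===== LEMMAS AND PROOFS =====

-- With stop ≤ start and a positive step, a range is empty.
lemma pyRange_pos_eq_nil (a b s : Int) (hs : 0 < s) (h : b ≤ a) :
    PySem.List.pyRange a b s = [] := by
  rw [PySem.List.pyRange_of_pos a b hs]
  rw [if_neg (by omega : ¬ a < b)]
  simp

-- For any limit, only min 100 limit matters; on limit ≤ 10 both sides are empty,
-- on 10 < limit < 100 we decide case by case, and for 100 ≤ limit min collapses to 100.
theorem special_two_digit_numbers_spec : Claim_equal_special_two_digit_numbers := by
  intro limit _
  unfold Spec_special_two_digit_numbers special_two_digit_numbers special_two_digit_numbers_alt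
  by_cases h100 : (100 : Int) ≤ limit
  · rw [min_eq_left h100]; decide
  · rw [min_eq_right (by omega : limit ≤ (100 : Int))]
    by_cases h10 : limit ≤ 10
    · rw [PySem.List.pyRange_one_eq_nil h10,
        pyRange_pos_eq_nil 19 limit 10 (by omega) (by omega)]
      rfl
    · have h1 : (11 : Int) ≤ limit := by omega
      have h2 : limit ≤ 99 := by omega
      interval_cases limit <;> decide
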